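-- pv_equiv track=rewrite | github.com/pi-pi-cat/pipicat | mult-desktop/a.py | calculate_layout
-- ===== SOURCE A (Python) =====
-- import math
--
-- def calculate_layout(desktop_width, desktop_height, num_browsers):
--     """计算浏览器窗口的布局"""
--     # 计算行数和列数
--     num_cols = math.ceil(math.sqrt(num_browsers))
--     num_rows = math.ceil(num_browsers / num_cols)
--
--     # 计算每个窗口的大小
--     window_width = desktop_width // num_cols
--     window_height = desktop_height // num_rows
--
--     # 计算每个窗口的位置
--     configs = []
--     for i in range(num_browsers):
--         row = i // num_cols
--         col = i % num_cols
--         x = col * window_width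
--         y = row * window_height
--         configs.append({"position": (x, y), "size": (window_width, window_height)})
--
--     return configs
-- ===== SOURCE B (Python) =====
-- import math
--
-- def calculate_layout(desktop_width, desktop_height, num_browsers):
--     """Grid layout via a running-coordinate state machine: x/y advance and wrap on a
--     column counter; no // or % inside the loop."""
--     num_cols = math.ceil(math.sqrt(num_browsers))
--     num_rows = math.ceil(num_browsers / num_cols)
--
--     window_width = desktop_width // num_cols
--     window_height = desktop_height // num_rows
--
--     configs = []
--     x = y = 0
--     col = 0
--     for _ in range(num_browsers):
--         configs.append({"position": (x, y), "size": (window_width, window_height)})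
--         col += 1
--         if col == num_cols:
--             col = 0
--             x = 0
--             y += window_height
--         else:
--             x += window_width
--     return configs
-- ===== Notes on version B (the rewrite author's own statement) =====
-- stated objective: alternative
-- what changed: Replaced A's per-iteration recovery of row/col from the index via // and % with a running-coordinate state machine: x, y and a column counter are carried through the loop, x advancing by window_width and wrapping (x=0, y+=window_height) when the counter reaches num_cols, so no division appears in the loop.
import Mathlib
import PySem

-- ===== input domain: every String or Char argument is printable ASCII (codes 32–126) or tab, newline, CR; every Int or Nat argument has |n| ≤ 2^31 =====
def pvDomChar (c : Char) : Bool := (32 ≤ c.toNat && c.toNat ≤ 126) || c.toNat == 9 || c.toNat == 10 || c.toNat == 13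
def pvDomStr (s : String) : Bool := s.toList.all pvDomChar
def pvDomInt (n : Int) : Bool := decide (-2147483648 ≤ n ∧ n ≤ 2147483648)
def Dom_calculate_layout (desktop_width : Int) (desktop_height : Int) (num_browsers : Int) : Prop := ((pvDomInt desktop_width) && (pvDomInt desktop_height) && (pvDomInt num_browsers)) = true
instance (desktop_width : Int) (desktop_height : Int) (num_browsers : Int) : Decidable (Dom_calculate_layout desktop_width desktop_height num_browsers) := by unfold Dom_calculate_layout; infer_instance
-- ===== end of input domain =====

-- B replaces A's per-item recovery of row/col from the loop index via // and % with a
-- running-coordinate state machine (x, y and a column counter carried through the loop,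
-- wrapping when the counter reaches num_cols) — objective: alternative, same cost.

-- ===== PORT A =====
-- math.ceil(math.sqrt n): hand-ported via Nat.sqrt; exact for 1 ≤ n ≤ 2^31, where CPython's
-- float sqrt rounds to a value whose ceiling equals the integer ceiling of the square root.
def pvCeilSqrt (n : Int) : Int :=
  if Nat.sqrt n.toNat * Nat.sqrt n.toNat = n.toNat then (Nat.sqrt n.toNat : Int)
  else (Nat.sqrt n.toNat : Int) + 1

-- math.ceil(a / b) for b > 0: hand-ported as -((-a) // b); exact on the domain (|a|,|b| ≤ 2^31,
-- where CPython's float true division is close enough that its ceiling is the exact one).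
def pvCeilDiv (a b : Int) : Int := -(PySem.Int.floordiv (-a) b)

def calculate_layout (desktop_width : Int) (desktop_height : Int) (num_browsers : Int) : List (List (String × Int × Int)) :=
  let num_cols := pvCeilSqrt num_browsers
  let num_rows := pvCeilDiv num_browsers num_cols
  let window_width := PySem.Int.floordiv desktop_width num_cols
  let window_height := PySem.Int.floordiv desktop_height num_rows
  (PySem.List.pyRange 0 num_browsers 1).foldl (fun configs i =>
    let row := PySem.Int.floordiv i num_cols
    let col := PySem.Int.mod i num_cols
    let x := col * window_width
    let y := row * window_height
    configs ++ [[("position", (x, y)), ("size", (window_width, window_height))]]) []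

-- ===== PORT B =====
-- the loop body: append the current (x, y) entry, then advance/wrap the running state;
-- 'for _ in range(num_browsers)' becomes structural recursion on the iteration count.
def pvAltLoop (ww wh ncols : Int) : Nat → Int → Int → Int → List (List (String × Int × Int)) → List (List (String × Int × Int))
  | 0, _, _, _, acc => acc
  | k + 1, x, y, col, acc =>
      let acc' := acc ++ [[("position", (x, y)), ("size", (ww, wh))]]
      if col + 1 = ncols then pvAltLoop ww wh ncols k 0 (y + wh) 0 acc'
      else pvAltLoop ww wh ncols k (x + ww) y (col + 1) acc'

def calculate_layout_alt (desktop_width : Int) (desktop_height : Int) (num_browsers : Int) : List (List (String × Int × Int)) :=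
  let num_cols := pvCeilSqrt num_browsers
  let num_rows := pvCeilDiv num_browsers num_cols
  let window_width := PySem.Int.floordiv desktop_width num_cols
  let window_height := PySem.Int.floordiv desktop_height num_rows
  pvAltLoop window_width window_height num_cols num_browsers.toNat 0 0 0 []

-- ===== PRECONDITION & SPEC =====
-- Pre_ excludes num_browsers ≤ 0, where A raises (ValueError from math.sqrt on negatives,
-- ZeroDivisionError for 0); B raises there identically (same header computations).
def Pre_calculate_layout (desktop_width : Int) (desktop_height : Int) (num_browsers : Int) : Prop := 1 ≤ num_browsers
instance (desktop_width : Int) (desktop_height : Int) (num_browsers : Int) : Decidable (Pre_calculate_layout desktop_width desktop_height num_browsers) := by unfold Pre_calculate_layout; infer_instance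
def pvWitness_calculate_layout : Int × Int × Int := (800, 600, 5)

def Spec_calculate_layout (desktop_width : Int) (desktop_height : Int) (num_browsers : Int) (out : List (List (String × Int × Int))) : Prop := out = calculate_layout_alt desktop_width desktop_height num_browsers
instance (desktop_width : Int) (desktop_height : Int) (num_browsers : Int) (out : List (List (String × Int × Int))) : Decidable (Spec_calculate_layout desktop_width desktop_height num_browsers out) := by unfold Spec_calculate_layout; infer_instance

-- ===== CLAIM (what is proved, stated in full; the proofs are below) =====
def Claim_equal_calculate_layout : Prop := ∀ (desktop_width : Int) (desktop_height : Int) (num_browsers : Int), Dom_calculate_layout desktop_width desktop_height num_browsers → Pre_calculate_layout desktop_width desktop_height num_browsers → Spec_calculate_layout desktop_width desktop_height num_browsers (calculate_layout desktop_width desktop_height num_browsers)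

-- ===== LEMMAS AND PROOFS =====

theorem pvCeilSqrt_pos (n : Int) (hn : 1 ≤ n) : 1 ≤ pvCeilSqrt n := by
  unfold pvCeilSqrt
  have hs : 0 < Nat.sqrt n.toNat := Nat.sqrt_pos.mpr (by omega)
  split <;> omega

-- successor of an index in mixed-radix (row, col) form
theorem pvStep_mod_div (i c : Nat) (hc : 1 ≤ c) :
    (i % c + 1 = c → (i + 1) % c = 0 ∧ (i + 1) / c = i / c + 1) ∧
    (i % c + 1 ≠ c → (i + 1) % c = i % c + 1 ∧ (i + 1) / c = i / c) := by
  have hi : i % c + c * (i / c) = i := Nat.mod_add_div i c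
  have hlt : i % c < c := Nat.mod_lt _ (by omega)
  have hmod : (i + 1) % c = (i % c + 1) % c := by
    conv_lhs => rw [← hi]
    rw [show i % c + c * (i / c) + 1 = (i % c + 1) + c * (i / c) by ring]
    exact Nat.add_mul_mod_self_left _ _ _
  have hdiv : (i + 1) / c = (i % c + 1) / c + i / c := by
    conv_lhs => rw [← hi]
    rw [show i % c + c * (i / c) + 1 = (i % c + 1) + c * (i / c) by ring]
    exact Nat.add_mul_div_left _ _ (by omega)
  constructor
  · intro h
    rw [hmod, hdiv, h]
    simp [Nat.div_self (show 0 < c by omega)]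
    omega
  · intro h
    rw [hmod, hdiv]
    have hlt' : i % c + 1 < c := by omega
    rw [Nat.mod_eq_of_lt hlt', Nat.div_eq_of_lt hlt']
    omega

-- loop invariant: from the state of flat index i, k more iterations append the entries
-- for indices i, i+1, …, i+k-1 (row = idx / c, col = idx % c)
theorem pvAltLoop_eq (ww wh : Int) (c : Nat) (hc : 1 ≤ c) :
    ∀ (k i : Nat) (acc : List (List (String × Int × Int))),
      pvAltLoop ww wh (c : Int) k (((i % c : Nat) : Int) * ww) (((i / c : Nat) : Int) * wh) ((i % c : Nat) : Int) acc =
        acc ++ (List.range k).map (fun j =>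
          [("position", ((((i + j) % c : Nat) : Int) * ww, (((i + j) / c : Nat) : Int) * wh)),
           ("size", (ww, wh))]) := by
  intro k
  induction k with
  | zero => intro i acc; simp [pvAltLoop]
  | succ k ih =>
      intro i acc
      obtain ⟨hwrap, hadv⟩ := pvStep_mod_div i c hc
      rw [pvAltLoop, List.range_succ_eq_map, List.map_cons, List.map_map]
      have hshift : ((fun j =>
          [(("position" : String), ((((i + j) % c : Nat) : Int) * ww, (((i + j) / c : Nat) : Int) * wh)),
           ("size", (ww, wh))]) ∘ Nat.succ) = (fun j =>
          [(("position" : String), ((((i + 1 + j) % c : Nat) : Int) * ww, (((i + 1 + j) / c : Nat) : Int) * wh)),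
           ("size", (ww, wh))]) := by
        funext j
        simp only [Function.comp_apply, Nat.succ_eq_add_one]
        rw [show i + (j + 1) = i + 1 + j by omega]
      by_cases h : i % c + 1 = c
      · have hcol : ((i % c : Nat) : Int) + 1 = (c : Int) := by exact_mod_cast h
        obtain ⟨hm, hd⟩ := hwrap h
        rw [if_pos hcol,
          show ((i / c : Nat) : Int) * wh + wh = ((i / c + 1 : Nat) : Int) * wh by push_cast; ring]
        have := ih (i + 1) (acc ++ [[("position", (((i % c : Nat) : Int) * ww, ((i / c : Nat) : Int) * wh)), ("size", (ww, wh))]])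
        rw [hm, hd] at this
        simp only [Nat.cast_zero, zero_mul] at this
        rw [this, hshift]
        simp [List.append_assoc]
      · have hcol : ¬ (((i % c : Nat) : Int) + 1 = (c : Int)) := by exact_mod_cast h
        obtain ⟨hm, hd⟩ := hadv h
        rw [if_neg hcol,
          show ((i % c : Nat) : Int) * ww + ww = ((i % c + 1 : Nat) : Int) * ww by push_cast; ring,
          show ((i % c : Nat) : Int) + 1 = ((i % c + 1 : Nat) : Int) by push_cast; ring]
        have := ih (i + 1) (acc ++ [[("position", (((i % c : Nat) : Int) * ww, ((i / c : Nat) : Int) * wh)), ("size", (ww, wh))]])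
        rw [hm, hd] at this
        rw [this, hshift]
        simp [List.append_assoc]

-- ===== VERDICT (by name: the statement is the Claim_ definition above) =====
theorem calculate_layout_spec : Claim_equal_calculate_layout := by
  intro w h n _ hpre
  have hpre' : (1 : Int) ≤ n := hpre
  obtain ⟨n', rfl⟩ : ∃ m : Nat, n = (m : Int) := ⟨n.toNat, by omega⟩
  have hcols : 1 ≤ pvCeilSqrt (n' : Int) := pvCeilSqrt_pos _ hpre'
  obtain ⟨c, hcn⟩ : ∃ m : Nat, pvCeilSqrt (n' : Int) = (m : Int) :=
    ⟨(pvCeilSqrt (n' : Int)).toNat, by omega⟩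
  have hc1 : 1 ≤ c := by omega
  unfold Spec_calculate_layout calculate_layout calculate_layout_alt
  simp only [hcn]
  -- A's side: fold-append = map over the flat range
  rw [PySem.List.foldl_append_singleton_eq_map, List.nil_append,
    PySem.List.pyRange_one 0 (n' : Int)]
  simp only [Int.sub_zero, Int.toNat_natCast, zero_add, List.map_map, Function.comp_def]
  -- B's side: the state machine from the state of index 0
  have hB := pvAltLoop_eq (PySem.Int.floordiv w (c : Int)) (PySem.Int.floordiv h (pvCeilDiv (n' : Int) (c : Int))) c hc1 n' 0 []
  simp only [Nat.zero_mod, Nat.zero_div, Nat.cast_zero, zero_mul, List.nil_append, Nat.zero_add] at hB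
  rw [hB]
  apply List.map_congr_left
  intro k _
  rw [PySem.Int.mod_natCast, PySem.Int.floordiv_natCast]
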